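-- pv_equiv track=rewrite | github.com/nermadie/CodeForces_Solutions | CodeforcesRound981Div3/prob02.py | solve
-- ===== SOURCE A (Python) =====
-- def solve(n, a):
--     result = 0
--     for i in range(n):
--         row = i
--         col = 0
--         min_line = 100000
--         while row < n and col < n:
--             if a[row][col] < min_line:
--                 min_line = a[row][col]
--             row += 1
--             col += 1
--         result -= min_line if min_line < 0 else 0
--     for i in range(1, n):
--         row = 0
--         col = i
--         min_line = 100000
--         while row < n and col < n:
--             if a[row][col] < min_line:
--                 min_line = a[row][col]
--             row += 1
--             col += 1
--         result -= min_line if min_line < 0 else 0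
--     return result
-- ===== SOURCE B (Python) =====
-- def solve(n, a):
--     # One row-major scan; table indexed by diagonal d = i - j + n - 1,
--     # then one pass over the collected minima.
--     mins = [100000] * (2 * n - 1)
--     for i in range(n):
--         for j in range(n):
--             v = a[i][j]
--             d = i - j + n - 1
--             if v < mins[d]:
--                 mins[d] = v
--     result = 0
--     for m in mins:
--         if m < 0:
--             result -= m
--     return result
-- ===== Notes on version B (the rewrite author's own statement) =====
-- stated objective: alternative
-- what changed: Replaces A's 2n-1 separate diagonal walks (two loops of while-walks, one per diagonal start) by a single row-major scan that accumulates each diagonal's minimum in a table indexed by i-j+n-1, followed by one pass over the table subtracting the negative minima.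
import Mathlib
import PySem

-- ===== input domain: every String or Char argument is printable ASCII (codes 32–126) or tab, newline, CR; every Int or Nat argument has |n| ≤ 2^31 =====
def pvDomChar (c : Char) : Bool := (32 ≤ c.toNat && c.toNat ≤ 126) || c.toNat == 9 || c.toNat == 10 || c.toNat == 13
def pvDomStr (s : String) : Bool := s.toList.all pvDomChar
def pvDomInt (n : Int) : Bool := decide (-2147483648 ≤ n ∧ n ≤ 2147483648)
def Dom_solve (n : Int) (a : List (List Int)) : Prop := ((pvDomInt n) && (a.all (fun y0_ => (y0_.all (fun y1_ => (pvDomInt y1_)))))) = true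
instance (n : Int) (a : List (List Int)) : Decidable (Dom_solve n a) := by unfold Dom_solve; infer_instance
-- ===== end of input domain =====

-- B replaces A's 2n-1 separate diagonal walks by one row-major scan into a table of
-- per-diagonal minima plus a final pass over that table (alternative decomposition,
-- same O(n^2) cost). Equivalence of return values is proved on Pre_solve.

-- shared indexing primitive: a[i][j]; the default is never read under Pre_solve
def cellA (a : List (List Int)) (i j : Int) : Int :=
  PySem.List.pyGetD (PySem.List.pyGetD a i []) j 0

-- ===== PORT A =====
-- the while-loop of A: walk down-right from (row, col) keeping the running minimum
def lineMin (n : Int) (a : List (List Int)) (row col min_line : Int) : Int :=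
  if h : row < n ∧ col < n then
    lineMin n a (row + 1) (col + 1)
      (if cellA a row col < min_line then cellA a row col else min_line)
  else min_line
termination_by (n - row).toNat
decreasing_by omega

def solve (n : Int) (a : List (List Int)) : Int :=
  let result := (PySem.List.pyRange 0 n 1).foldl
    (fun result i =>
      let min_line := lineMin n a i 0 100000
      result - (if min_line < 0 then min_line else 0)) 0
  (PySem.List.pyRange 1 n 1).foldl
    (fun result i =>
      let min_line := lineMin n a 0 i 100000
      result - (if min_line < 0 then min_line else 0)) result

-- ===== PORT B =====
def solve_alt (n : Int) (a : List (List Int)) : Int :=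
  let mins := (PySem.List.pyRange 0 n 1).foldl (fun mins i =>
      (PySem.List.pyRange 0 n 1).foldl (fun mins j =>
        let v := cellA a i j
        let d := i - j + n - 1
        -- mins[d]: d = i - j + n - 1 is within [0, 2n-1) on every executed iteration,
        -- so the total read/write forms pyGetD/pySetD are exact here
        if v < PySem.List.pyGetD mins d 0 then PySem.List.pySetD mins d v else mins)
        mins)
    (List.replicate (2 * n - 1).toNat (100000 : Int))
  mins.foldl (fun result m => if m < 0 then result - m else result) 0

-- ===== PRECONDITION & SPEC =====
-- Pre_solve holds exactly where Python A returns: either the loops are empty (n ≤ 0)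
-- or the first n rows exist and each has at least n entries (otherwise A raises IndexError).
def Pre_solve (n : Int) (a : List (List Int)) : Prop :=
  n ≤ 0 ∨ (n ≤ (a.length : Int) ∧ ∀ r ∈ a.take n.toNat, n ≤ (r.length : Int))
instance (n : Int) (a : List (List Int)) : Decidable (Pre_solve n a) := by
  unfold Pre_solve; infer_instance

def pvWitness_solve : Int × List (List Int) := (2, [[1, -2], [3, 4]])

def Spec_solve (n : Int) (a : List (List Int)) (out : Int) : Prop := out = solve_alt n a
instance (n : Int) (a : List (List Int)) (out : Int) : Decidable (Spec_solve n a out) := by unfold Spec_solve; infer_instance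

-- ===== CLAIM (what is proved, stated in full; the proofs are below) =====
def Claim_equal_solve : Prop := ∀ (n : Int) (a : List (List Int)), Dom_solve n a → Pre_solve n a → Spec_solve n a (solve n a)

-- ===== LEMMAS AND PROOFS =====

-- running minimum step (strict <, as both programs write it)
def minS (m v : Int) : Int := if v < m then v else m

-- negative part actually subtracted
def negP (m : Int) : Int := if m < 0 then m else 0

-- B's inner-loop step and row pass, named for the proofs (definitionally the
-- lambdas of solve_alt)
def stepB (n : Int) (a : List (List Int)) (i : Int) (T : List Int) (j : Int) : List Int :=
  if cellA a i j < PySem.List.pyGetD T (i - j + n - 1) 0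
  then PySem.List.pySetD T (i - j + n - 1) (cellA a i j) else T

def rowB (n : Int) (a : List (List Int)) (T : List Int) (i : Int) : List Int :=
  (PySem.List.pyRange 0 n 1).foldl (stepB n a i) T

-- reading table entry k
def readT (T : List Int) (k : Nat) : Int := PySem.List.pyGetD T (k : Int) 0

-- canonical per-diagonal minimum: diagonal index k (= i - j + n - 1), rows 0..r-1
def colMin (a : List (List Int)) (n : Int) (k : Nat) : Nat → Int
  | 0 => 100000
  | r + 1 =>
    let m := colMin a n k r
    let j : Int := (r : Int) + n - 1 - (k : Int)
    if 0 ≤ j ∧ j < n then minS m (cellA a r j) else m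

-- the cells of diagonal k among rows < r, in row order
def cellsK (a : List (List Int)) (n : Int) (k : Nat) (r : Nat) : List Int :=
  (List.range r).filterMap (fun (t : Nat) =>
    let j : Int := ((t : Nat) : Int) + n - 1 - (k : Int)
    if 0 ≤ j ∧ j < n then some (cellA a (t : Int) j) else none)

theorem filterMap_eq_map_of_mem {α β : Type} (l : List α) (f : α → Option β) (g : α → β)
    (h : ∀ x ∈ l, f x = some (g x)) : l.filterMap f = l.map g := by
  induction l with
  | nil => rfl
  | cons x xs ih =>
    simp only [List.filterMap_cons, h x (by simp), List.map_cons]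
    exact congrArg _ (ih fun y hy => h y (by simp [hy]))

theorem cellsK_succ (a : List (List Int)) (n : Int) (k : Nat) (r : Nat) :
    cellsK a n k (r + 1) = cellsK a n k r ++
      (if 0 ≤ (r : Int) + n - 1 - (k : Int) ∧ (r : Int) + n - 1 - (k : Int) < n
       then [cellA a r ((r : Int) + n - 1 - (k : Int))] else []) := by
  unfold cellsK
  rw [List.range_succ, List.filterMap_append]
  congr 1
  simp only [List.filterMap_cons, List.filterMap_nil]
  split_ifs <;> rfl

theorem colMin_eq_fold (a : List (List Int)) (n : Int) (k : Nat) (r : Nat) :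
    colMin a n k r = (cellsK a n k r).foldl minS 100000 := by
  induction r with
  | zero => rfl
  | succ r ih =>
    simp only [colMin]
    rw [cellsK_succ, List.foldl_append, ← ih]
    split_ifs with h <;> simp

-- generic: subtracting f of each element is initial minus the sum of the mapped list
theorem foldl_sub_map (xs : List Int) (f : Int → Int) (c : Int) :
    xs.foldl (fun r i => r - f i) c = c - (xs.map f).sum := by
  induction xs generalizing c with
  | nil => simp
  | cons x xs ih => simp only [List.foldl_cons, List.map_cons, List.sum_cons, ih]; ring

theorem foldl_negsub (xs : List Int) (c : Int) :
    xs.foldl (fun r m => if m < 0 then r - m else r) c = c - (xs.map negP).sum := by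
  induction xs generalizing c with
  | nil => simp
  | cons x xs ih =>
    simp only [List.foldl_cons, List.map_cons, List.sum_cons, ih, negP]
    split_ifs <;> ring

-- A's while-loop as a fold over its visited cells
theorem lineMin_eq_fold (n : Int) (a : List (List Int)) :
    ∀ (s : Nat) (r c m : Int), (s : Int) = min (n - r) (n - c) ⊔ 0 →
      lineMin n a r c m =
        ((List.range s).map (fun (t : Nat) => cellA a (r + (t : Int)) (c + (t : Int)))).foldl minS m := by
  intro s
  induction s with
  | zero =>
    intro r c m hs
    rw [lineMin]
    rw [dif_neg (by omega)]
    simp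
  | succ s ih =>
    intro r c m hs
    rw [lineMin, dif_pos (by omega : r < n ∧ c < n)]
    rw [ih (r + 1) (c + 1) _ (by omega)]
    rw [List.range_succ_eq_map, List.map_cons, List.foldl_cons, List.map_map]
    have hl : (List.range s).map ((fun (t : Nat) => cellA a (r + (t : Int)) (c + (t : Int))) ∘ Nat.succ)
        = (List.range s).map (fun (t : Nat) => cellA a (r + 1 + (t : Int)) (c + 1 + (t : Int))) := by
      apply List.map_congr_left
      intro t _
      simp only [Function.comp]
      congr 1 <;> push_cast <;> ring
    rw [hl]
    congr 1
    simp [minS, cellA]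

-- one step of B's inner loop, read back at table index k
theorem stepB_read (n : Int) (a : List (List Int)) (i jlo : Int) (hn : 0 < n)
    (hi : 0 ≤ i) (hi2 : i < n) (hjlo : 0 ≤ jlo) (hjn : jlo < n)
    (T : List Int) (hT : T.length = (2 * n - 1).toNat) (k : Nat) (hk : k < (2 * n - 1).toNat) :
    readT (stepB n a i T jlo) k
      = if (k : Int) = i - jlo + n - 1 then minS (readT T k) (cellA a i jlo) else readT T k := by
  have hc : i - jlo + n - 1 = (((i - jlo + n - 1).toNat : Nat) : Int) := by omega
  have hlt : (i - jlo + n - 1).toNat < T.length := by omega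
  unfold stepB readT
  rw [hc]
  by_cases h1 : cellA a i jlo < PySem.List.pyGetD T ((((i - jlo + n - 1).toNat : Nat)) : Int) 0
  · rw [if_pos h1, PySem.List.pyGetD_pySetD_natCast T (i - jlo + n - 1).toNat k (cellA a i jlo) 0 hlt]
    by_cases h2 : (k : Int) = (((i - jlo + n - 1).toNat : Nat) : Int)
    · rw [if_pos (by omega : k = (i - jlo + n - 1).toNat), if_pos h2]
      simp only [minS]
      rw [← h2] at h1
      rw [if_pos h1]
    · rw [if_neg (by omega : ¬ k = (i - jlo + n - 1).toNat), if_neg h2]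
  · rw [if_neg h1]
    by_cases h2 : (k : Int) = (((i - jlo + n - 1).toNat : Nat) : Int)
    · rw [if_pos h2]
      simp only [minS]
      rw [← h2] at h1
      rw [if_neg h1]
    · rw [if_neg h2]

theorem stepB_length (n : Int) (a : List (List Int)) (i jlo : Int) (T : List Int) :
    (stepB n a i T jlo).length = T.length := by
  unfold stepB
  split_ifs <;> simp [PySem.List.length_pySetD]

-- B's inner loop: each table index is hit at most once, by column j = i + n - 1 - k
theorem inner_loop (n : Int) (a : List (List Int)) (hn : 0 < n) (i : Int)
    (hi : 0 ≤ i) (hi2 : i < n) :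
    ∀ (fuel : Nat) (jlo : Int) (T : List Int), (fuel : Int) = (n - jlo) ⊔ 0 → 0 ≤ jlo →
      T.length = (2 * n - 1).toNat →
      ((PySem.List.pyRange jlo n 1).foldl (stepB n a i) T).length = (2 * n - 1).toNat ∧
      ∀ k : Nat, k < (2 * n - 1).toNat →
        readT ((PySem.List.pyRange jlo n 1).foldl (stepB n a i) T) k
        = (if jlo ≤ i + n - 1 - (k : Int) ∧ i + n - 1 - (k : Int) < n
           then minS (readT T k) (cellA a i (i + n - 1 - (k : Int)))
           else readT T k) := by
  intro fuel
  induction fuel with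
  | zero =>
    intro jlo T hfuel hjlo hT
    rw [PySem.List.pyRange_one_eq_nil (by omega)]
    refine ⟨hT, fun k hk => ?_⟩
    rw [if_neg (by omega)]
    rfl
  | succ fuel ih =>
    intro jlo T hfuel hjlo hT
    have hjn : jlo < n := by omega
    rw [PySem.List.pyRange_one_cons hjn, List.foldl_cons]
    have hlen : (stepB n a i T jlo).length = (2 * n - 1).toNat := by
      rw [stepB_length, hT]
    obtain ⟨ihlen, ihread⟩ := ih (jlo + 1) (stepB n a i T jlo) (by omega) (by omega) hlen
    refine ⟨ihlen, fun k hk => ?_⟩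
    rw [ihread k hk, stepB_read n a i jlo hn hi hi2 hjlo hjn T hT k hk]
    by_cases hcase : (k : Int) = i - jlo + n - 1
    · have hj : i + n - 1 - (k : Int) = jlo := by omega
      rw [if_neg (by omega : ¬ (jlo + 1 ≤ i + n - 1 - (k : Int) ∧ i + n - 1 - (k : Int) < n)),
        if_pos hcase, if_pos (by omega : jlo ≤ i + n - 1 - (k : Int) ∧ i + n - 1 - (k : Int) < n),
        hj]
    · rw [if_neg hcase]
      by_cases hc2 : jlo + 1 ≤ i + n - 1 - (k : Int) ∧ i + n - 1 - (k : Int) < n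
      · rw [if_pos hc2, if_pos (by omega)]
      · rw [if_neg hc2, if_neg (by omega)]

-- B's outer loop maintains colMin for every diagonal
theorem outer_loop (n : Int) (a : List (List Int)) (hn : 0 < n) :
    ∀ (fuel : Nat) (ilo : Int) (T : List Int), (fuel : Int) = n - ilo → 0 ≤ ilo → ilo ≤ n →
      T.length = (2 * n - 1).toNat →
      (∀ k : Nat, k < (2 * n - 1).toNat → readT T k = colMin a n k ilo.toNat) →
      ((PySem.List.pyRange ilo n 1).foldl (rowB n a) T).length = (2 * n - 1).toNat ∧
      ∀ k : Nat, k < (2 * n - 1).toNat →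
        readT ((PySem.List.pyRange ilo n 1).foldl (rowB n a) T) k = colMin a n k n.toNat := by
  intro fuel
  induction fuel with
  | zero =>
    intro ilo T hfuel h0 h1 hT hread
    have : ilo = n := by omega
    subst this
    rw [PySem.List.pyRange_one_eq_nil (by omega)]
    exact ⟨hT, hread⟩
  | succ fuel ih =>
    intro ilo T hfuel h0 h1 hT hread
    have hin : ilo < n := by omega
    rw [PySem.List.pyRange_one_cons hin, List.foldl_cons]
    obtain ⟨hlen', hread'⟩ :=
      inner_loop n a hn ilo h0 hin ((n : Int) ⊔ 0).toNat 0 T (by omega) le_rfl hT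
    have hstep : ∀ k : Nat, k < (2 * n - 1).toNat →
        readT (rowB n a T ilo) k = colMin a n k (ilo.toNat + 1) := by
      intro k hk
      unfold rowB
      rw [hread' k hk, hread k hk]
      simp only [colMin]
      have hc : ((ilo.toNat : Nat) : Int) = ilo := by omega
      by_cases hcond : 0 ≤ ilo + n - 1 - (k : Int) ∧ ilo + n - 1 - (k : Int) < n
      · rw [if_pos (by omega), if_pos (by omega : (0:Int) ≤ (ilo.toNat : Int) + n - 1 - (k:Int) ∧ (ilo.toNat : Int) + n - 1 - (k:Int) < n)]
        rw [hc]
      · rw [if_neg (by omega), if_neg (by omega : ¬((0:Int) ≤ (ilo.toNat : Int) + n - 1 - (k:Int) ∧ (ilo.toNat : Int) + n - 1 - (k:Int) < n))]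
    have hsucc : (ilo + 1).toNat = ilo.toNat + 1 := by omega
    exact ih (ilo + 1) (rowB n a T ilo) (by omega) (by omega) (by omega)
      (by unfold rowB; exact hlen') (by rw [hsucc]; exact hstep)

-- the cells A's first-loop walk from (i, 0) visits are exactly the cells of diagonal i + n - 1
theorem cellsK_pos (a : List (List Int)) (n : Int) (hn : 0 < n) (i : Int)
    (h0 : 0 ≤ i) (h1 : i < n) :
    cellsK a n (i + n - 1).toNat n.toNat
      = (List.range (n - i).toNat).map (fun (t : Nat) => cellA a (i + (t : Int)) ((0 : Int) + (t : Int))) := by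
  have hk : (((i + n - 1).toNat : Nat) : Int) = i + n - 1 := by omega
  have hsplit : n.toNat = i.toNat + (n - i).toNat := by omega
  unfold cellsK
  rw [hsplit, List.range_add, List.filterMap_append, List.filterMap_map]
  have h2 : (List.range i.toNat).filterMap (fun (t : Nat) =>
      let j : Int := ((t : Nat) : Int) + n - 1 - (((i + n - 1).toNat : Nat) : Int)
      if 0 ≤ j ∧ j < n then some (cellA a (t : Int) j) else none) = [] := by
    rw [List.filterMap_eq_nil_iff]
    intro t ht
    simp only [List.mem_range] at ht
    rw [if_neg (by omega)]
  rw [h2, List.nil_append]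
  apply filterMap_eq_map_of_mem
  intro t ht
  simp only [List.mem_range] at ht
  simp only [Function.comp]
  rw [if_pos (by push_cast; omega)]
  have e1 : ((i.toNat + t : Nat) : Int) = i + (t : Int) := by push_cast; omega
  rw [e1, hk]
  have e2 : i + (t : Int) + n - 1 - (i + n - 1) = 0 + (t : Int) := by ring
  rw [e2]

-- the cells A's second-loop walk from (0, i) visits are exactly the cells of diagonal n - 1 - i
theorem cellsK_neg (a : List (List Int)) (n : Int) (hn : 0 < n) (i : Int)
    (h0 : 1 ≤ i) (h1 : i < n) :
    cellsK a n (n - 1 - i).toNat n.toNat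
      = (List.range (n - i).toNat).map (fun (t : Nat) => cellA a ((0:Int) + (t : Int)) (i + (t : Int))) := by
  have hk : (((n - 1 - i).toNat : Nat) : Int) = n - 1 - i := by omega
  have hsplit : n.toNat = (n - i).toNat + i.toNat := by omega
  unfold cellsK
  rw [hsplit, List.range_add, List.filterMap_append, List.filterMap_map]
  have h2 : (List.range i.toNat).filterMap ((fun (t : Nat) =>
      let j : Int := ((t : Nat) : Int) + n - 1 - (((n - 1 - i).toNat : Nat) : Int)
      if 0 ≤ j ∧ j < n then some (cellA a (t : Int) j) else none) ∘ ((n - i).toNat + ·)) = [] := by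
    rw [List.filterMap_eq_nil_iff]
    intro t ht
    simp only [List.mem_range] at ht
    simp only [Function.comp]
    rw [if_neg (by push_cast; omega)]
  rw [h2, List.append_nil]
  apply filterMap_eq_map_of_mem
  intro t ht
  simp only [List.mem_range] at ht
  rw [if_pos (by omega)]
  rw [hk]
  have e1 : (t : Int) + n - 1 - (n - 1 - i) = i + (t : Int) := by ring
  rw [e1]
  norm_num

-- A's two loop bodies compute colMin of the corresponding diagonal
theorem lineMin_pos (n : Int) (a : List (List Int)) (hn : 0 < n) (i : Int)
    (h0 : 0 ≤ i) (h1 : i < n) :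
    lineMin n a i 0 100000 = colMin a n (i + n - 1).toNat n.toNat := by
  rw [lineMin_eq_fold n a (n - i).toNat i 0 100000 (by omega)]
  rw [colMin_eq_fold, cellsK_pos a n hn i h0 h1]

theorem lineMin_neg (n : Int) (a : List (List Int)) (hn : 0 < n) (i : Int)
    (h0 : 1 ≤ i) (h1 : i < n) :
    lineMin n a 0 i 100000 = colMin a n (n - 1 - i).toNat n.toNat := by
  rw [lineMin_eq_fold n a (n - i).toNat 0 i 100000 (by omega)]
  rw [colMin_eq_fold, cellsK_neg a n hn i h0 h1]

-- sum over a reflected range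
theorem sum_map_range_reflect (f : Nat → Int) (m : Nat) :
    ((List.range m).map (fun (t : Nat) => f (m - 1 - t))).sum = ((List.range m).map f).sum := by
  have h1 : ((List.range m).map (fun (t : Nat) => f (m - 1 - t))).sum
      = ∑ t ∈ Finset.range m, f (m - 1 - t) := rfl
  have h2 : ((List.range m).map f).sum = ∑ t ∈ Finset.range m, f t := rfl
  rw [h1, h2, Finset.sum_range_reflect]

-- ===== VERDICT (by name: the statement is the Claim_ definition above) =====
theorem solve_spec : Claim_equal_solve := by
  intro n a _hdom _hpre
  unfold Spec_solve
  by_cases hn : n ≤ 0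
  · -- all loops are empty
    have e0 : PySem.List.pyRange 0 n 1 = [] := PySem.List.pyRange_one_eq_nil (by omega)
    have e1 : PySem.List.pyRange 1 n 1 = [] := PySem.List.pyRange_one_eq_nil (by omega)
    have e2 : (2 * n - 1).toNat = 0 := by omega
    simp [solve, solve_alt, e0, e1, e2]
  · rw [not_le] at hn
    set N := n.toNat with hN
    set L := (2 * n - 1).toNat with hL
    -- characterise B's table
    have hT0len : (List.replicate L (100000 : Int)).length = L := by simp
    have hT0read : ∀ k : Nat, k < L → readT (List.replicate L (100000 : Int)) k = colMin a n k (0 : Int).toNat := by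
      intro k hk
      unfold readT
      rw [PySem.List.pyGetD_natCast]
      simp [List.getD, hk, colMin]
    obtain ⟨hMlen, hMread⟩ := outer_loop n a hn (n - 0).toNat 0
      (List.replicate L (100000 : Int)) (by omega) le_rfl (by omega) hT0len hT0read
    set M := (PySem.List.pyRange 0 n 1).foldl (rowB n a) (List.replicate L (100000 : Int)) with hM
    -- B's table as an explicit list
    have hMeq : M = (List.range L).map (fun k => colMin a n k N) := by
      have hMlenL : M.length = L := hMlen
      apply List.ext_getElem (by rw [hMlenL, List.length_map, List.length_range])
      intro k hk1 hk2
      have hkL : k < L := hMlenL ▸ hk1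
      have := hMread k hkL
      unfold readT at this
      rw [PySem.List.pyGetD_natCast] at this
      rw [List.getD_eq_getElem _ _ hk1] at this
      simp only [List.getElem_map, List.getElem_range]
      exact this
    -- B's value
    have hB : solve_alt n a = 0 - ((List.range L).map (fun k => negP (colMin a n k N))).sum := by
      show M.foldl (fun result m => if m < 0 then result - m else result) 0 = _
      rw [foldl_negsub, hMeq, List.map_map]
      rfl
    -- A's value
    have hA : solve n a
        = (0 - ((PySem.List.pyRange 0 n 1).map (fun i => negP (lineMin n a i 0 100000))).sum)
          - ((PySem.List.pyRange 1 n 1).map (fun i => negP (lineMin n a 0 i 100000))).sum := by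
      show (PySem.List.pyRange 1 n 1).foldl
          (fun result i => result - negP (lineMin n a 0 i 100000))
          ((PySem.List.pyRange 0 n 1).foldl
            (fun result i => result - negP (lineMin n a i 0 100000)) 0) = _
      rw [foldl_sub_map, foldl_sub_map]
    rw [hA, hB]
    -- rewrite A's two sums over diagonals
    have hs1 : ((PySem.List.pyRange 0 n 1).map (fun i => negP (lineMin n a i 0 100000))).sum
        = ((List.range N).map (fun (t : Nat) => negP (colMin a n (N - 1 + t) N))).sum := by
      rw [PySem.List.pyRange_one, List.map_map]
      have hzero : (n - 0).toNat = N := by omega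
      rw [hzero]
      congr 1
      apply List.map_congr_left
      intro t ht
      simp only [List.mem_range] at ht
      simp only [Function.comp]
      rw [lineMin_pos n a hn (0 + (t : Int)) (by omega) (by omega)]
      have e1 : ((0 : Int) + (t : Int) + n - 1).toNat = N - 1 + t := by omega
      rw [e1, ← hN]
    have hs2 : ((PySem.List.pyRange 1 n 1).map (fun i => negP (lineMin n a 0 i 100000))).sum
        = ((List.range (N - 1)).map (fun (t : Nat) => negP (colMin a n ((N - 1) - 1 - t) N))).sum := by
      rw [PySem.List.pyRange_one]
      have hlen : (n - 1).toNat = N - 1 := by omega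
      rw [hlen, List.map_map]
      congr 1
      apply List.map_congr_left
      intro t ht
      simp only [List.mem_range] at ht
      simp only [Function.comp]
      rw [lineMin_neg n a hn (1 + (t : Int)) (by omega) (by omega)]
      have e1 : (n - 1 - (1 + (t : Int))).toNat = (N - 1) - 1 - t := by omega
      rw [e1, ← hN]
    rw [hs1, hs2, sum_map_range_reflect (fun k => negP (colMin a n k N)) (N - 1)]
    -- split B's sum at N - 1
    have hLsplit : L = (N - 1) + N := by omega
    rw [hLsplit, List.range_add, List.map_append, List.sum_append, List.map_map]
    have : (List.range N).map ((fun k => negP (colMin a n k N)) ∘ ((N - 1) + ·))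
        = (List.range N).map (fun (t : Nat) => negP (colMin a n (N - 1 + t) N)) := rfl
    rw [this]
    ring
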